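-- pv_equiv track=rewrite | github.com/JEMAA-Youssef/r-seaux_personnages | listLP.py | prune_substrings
-- ===== SOURCE A (Python) =====
-- from collections import Counter
--
-- def _as_words(s: str) -> list[str]:
--     return s.split()
--
-- def _is_token_subspan(longer: str, shorter: str) -> bool:
--     """
--     True si `shorter` est une sous-séquence CONTIGUË de `longer` au niveau tokens.
--     Evite les faux matches par simple .find() sur chaîne.
--     """
--     lw, sw = _as_words(longer), _as_words(shorter)
--     if len(sw) >= len(lw):
--         return False
--     n, m = len(lw), len(sw)
--     for i in range(0, n - m + 1):
--         if lw[i:i+m] == sw: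
--             return True
--     return False
--
-- def prune_substrings(counts: Counter, min_gain: int = 1) -> Counter:
--     """
--     Supprime les n-grammes 'shorter' qui sont strictement inclus (en tant que sous-span de tokens)
--     dans une forme plus longue 'longer' dont la fréquence est >= (freq(shorter) - min_gain).
--     Logique: si la courte n'apporte pas de 'gain' de fréquence, on garde la longue.
--     """
--     # On travaille sur une liste triée pour favoriser les plus fortes et les plus longues
--     items = sorted(counts.items(), key=lambda kv: (-kv[1], -len(kv[0]), kv[0]))
--     kept = []  # liste de tuples (expr, freq)
--     for k, c in items:
--         # Si k est inclus dans un élément déjà 'kept' d'au moins même ordre de fréquence (avec marge min_gain), on jette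
--         drop = False
--         for big, cbig in kept:
--             if cbig >= c - min_gain and _is_token_subspan(big, k):
--                 drop = True
--                 break
--         if not drop:
--             kept.append((k, c))
--     # Reconstruire un Counter final
--     pruned = Counter()
--     for k, c in kept:
--         pruned[k] = c
--     return pruned
-- ===== SOURCE B (Python) =====
-- from collections import Counter
--
-- def prune_substrings(counts, min_gain: int = 1):
--     """Same pruning, but instead of re-scanning all kept items per candidate,
--     maintain an index: word-tuple -> max frequency of a kept item having that
--     tuple as a PROPER contiguous token subspan; each candidate is one lookup."""
--     items = sorted(counts.items(), key=lambda kv: (-kv[1], -len(kv[0]), kv[0]))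
--     kept = []
--     spans = {}  # tuple of tokens -> max freq among kept items strictly containing it
--     for k, c in items:
--         lw = k.split()
--         hit = spans.get(tuple(lw))
--         if hit is not None and hit >= c - min_gain:
--             continue
--         kept.append((k, c))
--         n = len(lw)
--         for m in range(n):  # proper subspans only: m < n
--             for i in range(n - m + 1):
--                 sp = tuple(lw[i:i + m])
--                 prev = spans.get(sp)
--                 if prev is None or prev < c:
--                     spans[sp] = c
--     pruned = Counter()
--     for k, c in kept:
--         pruned[k] = c
--     return pruned
-- ===== Notes on version B (the rewrite author's own statement) =====
-- stated objective: faster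
-- what changed: Instead of testing each candidate against every kept item with a quadratic token-subspan scan, B maintains a dictionary mapping each proper contiguous token-subspan of the kept items to the maximum frequency of a kept item containing it, so each candidate is decided by a single dictionary lookup.
import Mathlib
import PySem

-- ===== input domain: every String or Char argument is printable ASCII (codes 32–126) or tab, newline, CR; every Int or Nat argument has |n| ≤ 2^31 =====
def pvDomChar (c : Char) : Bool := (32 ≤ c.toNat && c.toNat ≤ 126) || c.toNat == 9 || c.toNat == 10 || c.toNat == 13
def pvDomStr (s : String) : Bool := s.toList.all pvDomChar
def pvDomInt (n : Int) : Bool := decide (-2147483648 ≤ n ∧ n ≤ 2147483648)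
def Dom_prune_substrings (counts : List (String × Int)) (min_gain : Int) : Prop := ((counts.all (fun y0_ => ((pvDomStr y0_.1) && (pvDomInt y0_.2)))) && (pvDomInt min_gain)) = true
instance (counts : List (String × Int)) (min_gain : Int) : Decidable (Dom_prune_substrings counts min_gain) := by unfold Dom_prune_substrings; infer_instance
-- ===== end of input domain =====

-- B replaces A's per-candidate scan of all kept items by a dictionary from each proper
-- contiguous token-subspan of the kept items to the maximal frequency of a kept item
-- containing it, so each candidate is decided by one lookup (measured faster at scale).


-- the sort key lambda (-kv[1], -len(kv[0]), kv[0]) appearing verbatim in both programs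
def pvSortKey (kv : String × Int) : Int ×ₗ (Int ×ₗ String) :=
  toLex (-kv.2, toLex (-(PySem.Str.len kv.1 : Int), kv.1))

-- _as_words(s) = s.split()
def pvWords (s : String) : List String := PySem.Str.split₀ s

-- ===== PORT A =====
-- _is_token_subspan(longer, shorter)
def pvIsTokenSubspan (longer shorter : String) : Bool :=
  let lw := pvWords longer
  let sw := pvWords shorter
  if sw.length ≥ lw.length then false
  else
    (PySem.List.pyRange 0 ((lw.length : Int) - (sw.length : Int) + 1) 1).any
      (fun i => PySem.List.slice lw (some i) (some (i + (sw.length : Int))) == sw)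

def prune_substrings (counts : List (String × Int)) (min_gain : Int) : List (String × Int) :=
  let items := PySem.List.sorted counts pvSortKey false
  let kept := items.foldl
    (fun kept kc =>
      let drop := kept.any (fun bc => decide (kc.2 - min_gain ≤ bc.2) && pvIsTokenSubspan bc.1 kc.1)
      if drop then kept else kept ++ [kc])
    ([] : List (String × Int))
  (kept.foldl (fun d kc => d.insert kc.1 kc.2) (PySem.Dict.empty : PySem.Dict String Int)).items

-- ===== PORT B =====
-- all proper contiguous token-subspans lw[i:i+m], m < n, 0 ≤ i ≤ n-m (the two range loops)
def pvSpanKeys (lw : List String) : List (List String) :=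
  (List.range lw.length).flatMap (fun m =>
    (List.range (lw.length - m + 1)).map (fun i => (lw.drop i).take m))

-- the inner double loop: spans[sp] = c whenever sp is absent or its stored value is < c
def pvAddSpans (spans : PySem.Dict (List String) Int) (lw : List String) (c : Int) :
    PySem.Dict (List String) Int :=
  (pvSpanKeys lw).foldl
    (fun d sp =>
      match d.get? sp with
      | some prev => if prev < c then d.insert sp c else d
      | none => d.insert sp c)
    spans

def prune_substrings_alt (counts : List (String × Int)) (min_gain : Int) : List (String × Int) :=
  let items := PySem.List.sorted counts pvSortKey false
  let st := items.foldl
    (fun st kc =>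
      let lw := pvWords kc.1
      match st.2.get? lw with
      | some hit =>
          if kc.2 - min_gain ≤ hit then st
          else (st.1 ++ [kc], pvAddSpans st.2 lw kc.2)
      | none => (st.1 ++ [kc], pvAddSpans st.2 lw kc.2))
    (([] : List (String × Int)), (PySem.Dict.empty : PySem.Dict (List String) Int))
  (st.1.foldl (fun d kc => d.insert kc.1 kc.2) (PySem.Dict.empty : PySem.Dict String Int)).items

-- ===== PRECONDITION & SPEC =====
def Spec_prune_substrings (counts : List (String × Int)) (min_gain : Int) (out : List (String × Int)) : Prop := out = prune_substrings_alt counts min_gain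
instance (counts : List (String × Int)) (min_gain : Int) (out : List (String × Int)) : Decidable (Spec_prune_substrings counts min_gain out) := by unfold Spec_prune_substrings; infer_instance

-- ===== CLAIM (what is proved, stated in full; the proofs are below) =====
def Claim_equal_prune_substrings : Prop := ∀ (counts : List (String × Int)) (min_gain : Int), Dom_prune_substrings counts min_gain → Spec_prune_substrings counts min_gain (prune_substrings counts min_gain)

-- ===== LEMMAS AND PROOFS =====

-- running max of an optional accumulator
def pvOMax : Option Int → Int → Int
  | some v, c => max v c
  | none,   c => c

-- spec of B's dictionary value at ws: max frequency over the kept items strictly containing ws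
def pvMaxSub (kept : List (String × Int)) (ws : List String) : Option Int :=
  kept.foldl
    (fun acc bc => if ws ∈ pvSpanKeys (pvWords bc.1) then some (pvOMax acc bc.2) else acc)
    none

lemma mem_pvSpanKeys_iff (lw ws : List String) :
    ws ∈ pvSpanKeys lw ↔
      ws.length < lw.length ∧
        ∃ i, i ≤ lw.length - ws.length ∧ (lw.drop i).take ws.length = ws := by
  simp only [pvSpanKeys, List.mem_flatMap, List.mem_map, List.mem_range]
  constructor
  · rintro ⟨m, hm, i, hi, rfl⟩
    have hlen : ((lw.drop i).take m).length = m := by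
      simp [List.length_take, List.length_drop]; omega
    rw [hlen]
    exact ⟨hm, i, by omega, rfl⟩
  · rintro ⟨hm, i, hi, h⟩
    exact ⟨ws.length, hm, i, by omega, h⟩

lemma pvIsTokenSubspan_iff (big k : String) :
    pvIsTokenSubspan big k = true ↔ pvWords k ∈ pvSpanKeys (pvWords big) := by
  unfold pvIsTokenSubspan
  set lw := pvWords big with hlw
  set sw := pvWords k with hsw
  rw [mem_pvSpanKeys_iff]
  by_cases hge : sw.length ≥ lw.length
  · simp [hge]
  · simp only [hge, ite_false, List.any_eq_true, beq_iff_eq]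
    constructor
    · rintro ⟨i, hi, hsl⟩
      rw [PySem.List.mem_pyRange_one] at hi
      obtain ⟨h0, hib⟩ := hi
      obtain ⟨j, rfl⟩ := Int.eq_ofNat_of_zero_le h0
      rw [show ((j : Int) + (sw.length : Int)) = ((j + sw.length : Nat) : Int) by push_cast; ring,
        PySem.List.slice_natCast] at hsl
      have : (j : Int) < (lw.length : Int) - (sw.length : Int) + 1 := hib
      refine ⟨by omega, j, by omega, ?_⟩
      simpa [Nat.add_sub_cancel_left] using hsl
    · rintro ⟨hm, j, hj, h⟩
      refine ⟨(j : Int), ?_, ?_⟩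
      · rw [PySem.List.mem_pyRange_one]
        constructor
        · positivity
        · omega
      · rw [show ((j : Int) + (sw.length : Int)) = ((j + sw.length : Nat) : Int) by push_cast; ring,
          PySem.List.slice_natCast]
        simpa [Nat.add_sub_cancel_left] using h

lemma get?_foldl_maxins (L : List (List String)) (d : PySem.Dict (List String) Int)
    (c : Int) (ws : List String) :
    (L.foldl
      (fun d sp =>
        match d.get? sp with
        | some prev => if prev < c then d.insert sp c else d
        | none => d.insert sp c) d).get? ws =
      if ws ∈ L then some (pvOMax (d.get? ws) c) else d.get? ws := by
  induction L generalizing d with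
  | nil => simp
  | cons sp rest ih =>
    rw [List.foldl_cons, ih]
    by_cases hsp : sp = ws
    · subst hsp
      have hstep : (match d.get? sp with
        | some prev => if prev < c then d.insert sp c else d
        | none => d.insert sp c).get? sp = some (pvOMax (d.get? sp) c) := by
        cases h : d.get? sp with
        | none => simp [PySem.Dict.get?_insert_self, pvOMax]
        | some prev =>
          by_cases hc : prev < c
          · simp [hc, PySem.Dict.get?_insert_self, pvOMax]; omega
          · simp [hc, h, pvOMax]; omega
      by_cases hmem : sp ∈ rest
      · simp only [hmem, if_pos, hstep]
        cases d.get? sp <;> simp [pvOMax]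
      · simp [hmem, hstep]
    · have hstep : (match d.get? sp with
        | some prev => if prev < c then d.insert sp c else d
        | none => d.insert sp c).get? ws = d.get? ws := by
        cases h : d.get? sp with
        | none => simp [PySem.Dict.get?_insert_of_ne _ _ (Ne.symm hsp)]
        | some prev =>
          by_cases hc : prev < c
          · simp [hc, PySem.Dict.get?_insert_of_ne _ _ (Ne.symm hsp)]
          · simp [hc]
      rw [hstep]
      simp [Ne.symm hsp]

lemma get?_pvAddSpans (spans : PySem.Dict (List String) Int) (lw : List String) (c : Int)
    (ws : List String) :
    (pvAddSpans spans lw c).get? ws =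
      if ws ∈ pvSpanKeys lw then some (pvOMax (spans.get? ws) c) else spans.get? ws :=
  get?_foldl_maxins _ spans c ws

lemma pvMaxSub_append (kept : List (String × Int)) (kc : String × Int) (ws : List String) :
    pvMaxSub (kept ++ [kc]) ws =
      if ws ∈ pvSpanKeys (pvWords kc.1) then some (pvOMax (pvMaxSub kept ws) kc.2)
      else pvMaxSub kept ws := by
  unfold pvMaxSub
  rw [List.foldl_append]
  simp

lemma pvMaxSub_le_iff (kept : List (String × Int)) (ws : List String) (t : Int) :
    (∃ v, pvMaxSub kept ws = some v ∧ t ≤ v) ↔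
      ∃ bc ∈ kept, ws ∈ pvSpanKeys (pvWords bc.1) ∧ t ≤ bc.2 := by
  induction kept using List.reverseRecOn with
  | nil => simp [pvMaxSub]
  | append_singleton kept kc ih =>
    rw [pvMaxSub_append]
    by_cases hmem : ws ∈ pvSpanKeys (pvWords kc.1)
    · simp only [hmem, if_pos, List.mem_append, List.mem_singleton]
      constructor
      · rintro ⟨v, hv, hle⟩
        obtain rfl : v = pvOMax (pvMaxSub kept ws) kc.2 := by injection hv.symm
        cases h : pvMaxSub kept ws with
        | none =>
          rw [h] at hle
          exact ⟨kc, Or.inr rfl, hmem, hle⟩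
        | some w =>
          rw [h] at hle
          simp only [pvOMax, le_max_iff] at hle
          rcases hle with hle | hle
          · obtain ⟨bc, hbc, hsp, hbcle⟩ := ih.mp ⟨w, h, hle⟩
            exact ⟨bc, Or.inl hbc, hsp, hbcle⟩
          · exact ⟨kc, Or.inr rfl, hmem, hle⟩
      · rintro ⟨bc, hbc | rfl, hsp, hle⟩
        · obtain ⟨v, hv, hvle⟩ := ih.mpr ⟨bc, hbc, hsp, hle⟩
          refine ⟨pvOMax (pvMaxSub kept ws) kc.2, rfl, ?_⟩
          rw [hv]; simp only [pvOMax, le_max_iff]; exact Or.inl hvle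
        · refine ⟨_, rfl, ?_⟩
          cases pvMaxSub kept ws <;> simp [pvOMax] <;> omega
    · simp only [hmem, if_neg, not_false_iff, ih, List.mem_append, List.mem_singleton]
      constructor
      · rintro ⟨bc, hbc, hsp, hle⟩; exact ⟨bc, Or.inl hbc, hsp, hle⟩
      · rintro ⟨bc, hbc | rfl, hsp, hle⟩
        · exact ⟨bc, hbc, hsp, hle⟩
        · exact absurd hsp hmem

-- A's inner scan of kept, expressed through B's dictionary value
lemma drop_eq (kept : List (String × Int)) (kc : String × Int) (g : Int) :
    (kept.any (fun bc => decide (kc.2 - g ≤ bc.2) && pvIsTokenSubspan bc.1 kc.1)) = true ↔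
      ∃ v, pvMaxSub kept (pvWords kc.1) = some v ∧ kc.2 - g ≤ v := by
  rw [pvMaxSub_le_iff, List.any_eq_true]
  constructor
  · rintro ⟨bc, hbc, hcond⟩
    simp only [Bool.and_eq_true, decide_eq_true_eq] at hcond
    exact ⟨bc, hbc, (pvIsTokenSubspan_iff bc.1 kc.1).mp hcond.2, hcond.1⟩
  · rintro ⟨bc, hbc, hsp, hle⟩
    refine ⟨bc, hbc, ?_⟩
    simp only [Bool.and_eq_true, decide_eq_true_eq]
    exact ⟨hle, (pvIsTokenSubspan_iff bc.1 kc.1).mpr hsp⟩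

-- the invariant survives appending a kept item
lemma inv_step (kept : List (String × Int)) (spans : PySem.Dict (List String) Int)
    (kc : String × Int) (hinv : ∀ ws, spans.get? ws = pvMaxSub kept ws) (ws : List String) :
    (pvAddSpans spans (pvWords kc.1) kc.2).get? ws = pvMaxSub (kept ++ [kc]) ws := by
  rw [get?_pvAddSpans, pvMaxSub_append, hinv]

lemma loop_inv (g : Int) (items : List (String × Int)) :
    ∀ (kept : List (String × Int)) (spans : PySem.Dict (List String) Int),
      (∀ ws, spans.get? ws = pvMaxSub kept ws) →
      items.foldl
          (fun kept kc =>
            let drop := kept.any (fun bc => decide (kc.2 - g ≤ bc.2) && pvIsTokenSubspan bc.1 kc.1)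
            if drop then kept else kept ++ [kc]) kept
        = (items.foldl
            (fun st kc =>
              let lw := pvWords kc.1
              match st.2.get? lw with
              | some hit =>
                  if kc.2 - g ≤ hit then st
                  else (st.1 ++ [kc], pvAddSpans st.2 lw kc.2)
              | none => (st.1 ++ [kc], pvAddSpans st.2 lw kc.2)) (kept, spans)).1 ∧
      (∀ ws, (items.foldl
            (fun st kc =>
              let lw := pvWords kc.1
              match st.2.get? lw with
              | some hit =>
                  if kc.2 - g ≤ hit then st
                  else (st.1 ++ [kc], pvAddSpans st.2 lw kc.2)
              | none => (st.1 ++ [kc], pvAddSpans st.2 lw kc.2)) (kept, spans)).2.get? ws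
          = pvMaxSub (items.foldl
              (fun kept kc =>
                let drop := kept.any (fun bc => decide (kc.2 - g ≤ bc.2) && pvIsTokenSubspan bc.1 kc.1)
                if drop then kept else kept ++ [kc]) kept) ws) := by
  induction items with
  | nil => intro kept spans hinv; exact ⟨rfl, fun ws => hinv ws⟩
  | cons kc rest ih =>
    intro kept spans hinv
    rw [List.foldl_cons, List.foldl_cons]
    dsimp only
    cases h : spans.get? (pvWords kc.1) with
    | none =>
      have hdrop : (kept.any (fun bc => decide (kc.2 - g ≤ bc.2) && pvIsTokenSubspan bc.1 kc.1)) = false := by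
        rw [Bool.eq_false_iff]
        intro hc
        obtain ⟨v, hv, _⟩ := (drop_eq kept kc g).mp hc
        rw [hinv, hv] at h; simp at h
      rw [hdrop]
      dsimp only [Bool.false_eq_true, if_false]
      exact ih (kept ++ [kc]) _ (inv_step kept spans kc hinv)
    | some v =>
      by_cases hle : kc.2 - g ≤ v
      · have hdrop : (kept.any (fun bc => decide (kc.2 - g ≤ bc.2) && pvIsTokenSubspan bc.1 kc.1)) = true :=
          (drop_eq kept kc g).mpr ⟨v, by rw [← hinv, h], hle⟩
        rw [hdrop]
        dsimp only [if_true]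
        simp only [hle, if_pos]
        exact ih kept spans hinv
      · have hdrop : (kept.any (fun bc => decide (kc.2 - g ≤ bc.2) && pvIsTokenSubspan bc.1 kc.1)) = false := by
          rw [Bool.eq_false_iff]
          intro hc
          obtain ⟨v', hv', hle'⟩ := (drop_eq kept kc g).mp hc
          rw [hinv, hv'] at h
          injection h with h'
          exact hle (h' ▸ hle')
        rw [hdrop]
        dsimp only [Bool.false_eq_true, if_false]
        simp only [hle]
        exact ih (kept ++ [kc]) _ (inv_step kept spans kc hinv)

-- ===== VERDICT (by name: the statement is the Claim_ definition above) =====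
theorem prune_substrings_spec : Claim_equal_prune_substrings := by
  intro counts min_gain _hdom
  have h := loop_inv min_gain (PySem.List.sorted counts pvSortKey false) [] PySem.Dict.empty
    (fun ws => by simp [pvMaxSub])
  simp only [Spec_prune_substrings, prune_substrings, prune_substrings_alt]
  rw [h.1]
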